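-- pv_equiv track=rewrite | github.com/tensorflow/tensorflow | tensorflow/python/autograph/tests/loop_with_function_call_test.py | while_with_method_closure_call
-- ===== SOURCE A (Python) =====
-- def while_with_method_closure_call(n):
--   i = 0
--
--   class Callable(object):
--
--     def __call__(self):
--       return i
--
--   i_via_closure = Callable()
--   i = 0
--   s = 0
--   while i < n:
--     s = s * 10 + i_via_closure()
--     i += 1
--   return s
-- ===== SOURCE B (Python) =====
-- def while_with_method_closure_call(n):
--   s = 0
--   p = 1
--   for i in reversed(range(n)):
--     s += i * p
--     p *= 10
--   return s
-- ===== Notes on version B (the rewrite author's own statement) =====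
-- stated objective: alternative
-- what changed: Replaces the Horner-style while loop s = s*10 + i (with the Callable-closure obfuscation) by a back-to-front for loop over reversed(range(n)) that adds each value's positional contribution i*p while maintaining an explicit running power of ten p, never multiplying the accumulator.
import Mathlib
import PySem

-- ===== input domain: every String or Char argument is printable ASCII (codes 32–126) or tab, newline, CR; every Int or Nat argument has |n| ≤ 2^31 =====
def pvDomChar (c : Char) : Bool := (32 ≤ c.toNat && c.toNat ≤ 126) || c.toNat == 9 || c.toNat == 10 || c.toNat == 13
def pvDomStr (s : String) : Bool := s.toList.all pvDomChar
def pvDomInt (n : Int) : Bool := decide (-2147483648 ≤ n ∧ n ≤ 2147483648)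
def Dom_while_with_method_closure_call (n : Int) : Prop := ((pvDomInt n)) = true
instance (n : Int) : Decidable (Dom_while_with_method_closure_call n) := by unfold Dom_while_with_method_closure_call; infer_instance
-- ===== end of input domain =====

-- B replaces A's Horner-style while loop (and its Callable closure returning i) by a
-- back-to-front loop over reversed(range(n)) adding i*p with an explicit running power of ten p.

-- ===== PORT A =====
-- the while loop 'while i < n: s = s*10 + i_via_closure(); i += 1' (the closure returns i);
-- fuel n.toNat is exactly the number of iterations the loop performs
def pvLoopA (n : Int) : Nat → Int → Int → Int
  | 0, _, s => s
  | f+1, i, s => if i < n then pvLoopA n f (i+1) (s*10 + i) else s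

def while_with_method_closure_call (n : Int) : Int := pvLoopA n n.toNat 0 0

-- ===== PORT B =====
-- for i in reversed(range(n)): s += i*p; p *= 10   (state (s, p) starts at (0, 1))
def while_with_method_closure_call_alt (n : Int) : Int :=
  (((PySem.List.pyRange 0 n 1).reverse).foldl
      (fun (sp : Int × Int) i => (sp.1 + i * sp.2, sp.2 * 10)) (0, 1)).1

-- ===== PRECONDITION & SPEC =====
def Spec_while_with_method_closure_call (n : Int) (out : Int) : Prop := out = while_with_method_closure_call_alt n
instance (n : Int) (out : Int) : Decidable (Spec_while_with_method_closure_call n out) := by unfold Spec_while_with_method_closure_call; infer_instance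

-- ===== CLAIM (what is proved, stated in full; the proofs are below) =====
def Claim_equal_while_with_method_closure_call : Prop := ∀ (n : Int), Dom_while_with_method_closure_call n → Spec_while_with_method_closure_call n (while_with_method_closure_call n)

-- ===== LEMMAS AND PROOFS =====

-- A's while loop is the Horner fold over the remaining range i, i+1, …, n-1
theorem pvLoopA_eq_foldl (n : Int) (m : Nat) :
    ∀ (i s : Int), i + m = n →
      pvLoopA n m i s = (PySem.List.pyRange i n 1).foldl (fun s j => s * 10 + j) s := by
  induction m with
  | zero =>
    intro i s h
    rw [PySem.List.pyRange_one_eq_nil (by omega)]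
    simp [pvLoopA]
  | succ m ih =>
    intro i s h
    have hi : i < n := by omega
    rw [PySem.List.pyRange_one_cons hi]
    simp only [pvLoopA, hi, if_pos, List.foldl_cons]
    exact ih (i+1) (s*10 + i) (by omega)

-- shifting the Horner accumulator: foldl from s is s·10^len plus foldl from 0
theorem pvHorner_shift (l : List Int) :
    ∀ s : Int, l.foldl (fun s j => s * 10 + j) s
      = s * 10 ^ l.length + l.foldl (fun s j => s * 10 + j) 0 := by
  induction l with
  | nil => intro s; simp
  | cons j l ih =>
    intro s
    simp only [List.foldl_cons, List.length_cons]
    rw [ih (s*10 + j), ih (0*10 + j)]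
    ring

-- B's reversed fold computes (Horner value, 10^length)
theorem pvFoldr_eq_horner (l : List Int) :
    l.foldr (fun i (sp : Int × Int) => (sp.1 + i * sp.2, sp.2 * 10)) (0, 1)
      = (l.foldl (fun s j => s * 10 + j) 0, 10 ^ l.length) := by
  induction l with
  | nil => simp
  | cons i l ih =>
    simp only [List.foldr_cons, List.foldl_cons, List.length_cons, ih]
    rw [pvHorner_shift l (0*10 + i)]
    refine Prod.ext ?_ ?_ <;> simp <;> ring

-- ===== VERDICT (by name: the statement is the Claim_ definition above) =====
theorem while_with_method_closure_call_spec : Claim_equal_while_with_method_closure_call := by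
  intro n _
  unfold Spec_while_with_method_closure_call while_with_method_closure_call while_with_method_closure_call_alt
  rw [List.foldl_reverse, pvFoldr_eq_horner]
  by_cases hn : n ≤ 0
  · have h1 : n.toNat = 0 := by omega
    rw [h1, PySem.List.pyRange_one_eq_nil hn]
    simp [pvLoopA]
  · exact pvLoopA_eq_foldl n n.toNat 0 0 (by omega)
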